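-- pv_equiv track=rewrite | github.com/DavidGostincar10342019/ekgsignals-be | app/analysis/arrhythmia_detection.py | get_overall_assessment
-- ===== SOURCE A (Python) =====
-- def get_overall_assessment(arrhythmias):
--     """
--     Ukupna procena na osnovu detektovanih aritmija
--     """
--     if not arrhythmias:
--         return "Normalan ritam"
--
--     severity_levels = [arr["severity"] for arr in arrhythmias]
--
--     if "high" in severity_levels:
--         return "Potrebna medicinska pažnja"
--     elif "medium" in severity_levels:
--         return "Preporučuje se konsultacija sa lekarom"
--     else:
--         return "Blage nepravilnosti detektovane"
-- ===== SOURCE B (Python) =====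
-- def get_overall_assessment(arrhythmias):
--     if not arrhythmias:
--         return "Normalan ritam"
--     priority = {"high": 2, "medium": 1}
--     worst = 0
--     for arr in arrhythmias:
--         worst = max(worst, priority.get(arr["severity"], 0))
--     if worst == 2:
--         return "Potrebna medicinska pažnja"
--     if worst == 1:
--         return "Preporučuje se konsultacija sa lekarom"
--     return "Blage nepravilnosti detektovane"
-- ===== Notes on version B (the rewrite author's own statement) =====
-- stated objective: alternative
-- what changed: Replaces A's materialized severity list plus two separate membership scans with a single accumulating pass keeping the maximal severity priority, translated to the message afterwards.
import Mathlib
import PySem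

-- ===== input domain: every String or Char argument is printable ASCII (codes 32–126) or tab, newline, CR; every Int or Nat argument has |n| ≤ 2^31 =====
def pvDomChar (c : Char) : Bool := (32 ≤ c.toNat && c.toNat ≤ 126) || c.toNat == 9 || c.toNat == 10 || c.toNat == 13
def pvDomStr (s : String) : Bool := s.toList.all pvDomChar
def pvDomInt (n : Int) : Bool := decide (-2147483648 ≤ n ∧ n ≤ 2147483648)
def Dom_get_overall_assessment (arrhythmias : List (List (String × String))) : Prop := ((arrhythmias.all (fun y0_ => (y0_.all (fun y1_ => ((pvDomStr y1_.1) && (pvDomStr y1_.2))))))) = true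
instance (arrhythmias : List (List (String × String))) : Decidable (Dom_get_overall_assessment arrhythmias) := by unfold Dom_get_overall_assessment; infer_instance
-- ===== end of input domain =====

-- B folds the maximal severity priority in one pass instead of A's list build plus two membership scans (objective: alternative decomposition, same cost).

-- ===== PORT A =====
def get_overall_assessment (arrhythmias : List (List (String × String))) : String :=
  if arrhythmias = [] then "Normalan ritam"
  else
    -- arr["severity"]: first-match association-list lookup; Pre_ guarantees the key exists
    let severity_levels := arrhythmias.map (fun arr => arr.lookup "severity")
    if severity_levels.contains (some "high") then "Potrebna medicinska pažnja"
    else if severity_levels.contains (some "medium") then "Preporučuje se konsultacija sa lekarom"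
    else "Blage nepravilnosti detektovane"

-- ===== PORT B =====
-- priority.get(arr["severity"], 0)
def pvPrio (s : Option String) : Int :=
  if s = some "high" then 2 else if s = some "medium" then 1 else 0

def get_overall_assessment_alt (arrhythmias : List (List (String × String))) : String :=
  if arrhythmias = [] then "Normalan ritam"
  else
    let worst := arrhythmias.foldl (fun w arr => max w (pvPrio (arr.lookup "severity"))) 0
    if worst = 2 then "Potrebna medicinska pažnja"
    else if worst = 1 then "Preporučuje se konsultacija sa lekarom"
    else "Blage nepravilnosti detektovane"

-- ===== PRECONDITION & SPEC =====
-- Pre_ excludes exactly the inputs on which Python A raises KeyError: an element dict without the "severity" key (B raises there too).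
def Pre_get_overall_assessment (arrhythmias : List (List (String × String))) : Prop :=
  ∀ arr ∈ arrhythmias, (arr.lookup "severity").isSome
instance (arrhythmias : List (List (String × String))) : Decidable (Pre_get_overall_assessment arrhythmias) := by unfold Pre_get_overall_assessment; infer_instance

def pvWitness_get_overall_assessment : (List (List (String × String))) := [[("severity", "high")], [("severity", "low")]]

def Spec_get_overall_assessment (arrhythmias : List (List (String × String))) (out : String) : Prop := out = get_overall_assessment_alt arrhythmias
instance (arrhythmias : List (List (String × String))) (out : String) : Decidable (Spec_get_overall_assessment arrhythmias out) := by unfold Spec_get_overall_assessment; infer_instance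

-- ===== CLAIM (what is proved, stated in full; the proofs are below) =====
def Claim_equal_get_overall_assessment : Prop := ∀ (arrhythmias : List (List (String × String))), Dom_get_overall_assessment arrhythmias → Pre_get_overall_assessment arrhythmias → Spec_get_overall_assessment arrhythmias (get_overall_assessment arrhythmias)

-- ===== LEMMAS AND PROOFS =====

theorem pvPrio_bounds (s : Option String) : 0 ≤ pvPrio s ∧ pvPrio s ≤ 2 := by
  unfold pvPrio; split_ifs <;> omega

-- shift the foldl accumulator out
theorem pv_foldl_max_shift (l : List (List (String × String))) (w : Int) (hw : 0 ≤ w) :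
    l.foldl (fun w arr => max w (pvPrio (arr.lookup "severity"))) w
      = max w (l.foldl (fun w arr => max w (pvPrio (arr.lookup "severity"))) 0) := by
  induction l generalizing w with
  | nil => simp; omega
  | cons h t ih =>
      simp only [List.foldl_cons]
      have hp := pvPrio_bounds (h.lookup "severity")
      rw [ih _ (by omega), ih (max 0 (pvPrio (h.lookup "severity"))) (by omega)]
      omega

theorem pv_worst_bounds (l : List (List (String × String))) :
    0 ≤ l.foldl (fun w arr => max w (pvPrio (arr.lookup "severity"))) 0
      ∧ l.foldl (fun w arr => max w (pvPrio (arr.lookup "severity"))) 0 ≤ 2 := by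
  induction l with
  | nil => simp
  | cons h t ih =>
      simp only [List.foldl_cons]
      rw [pv_foldl_max_shift _ _ (by have := pvPrio_bounds (h.lookup "severity"); omega)]
      have := pvPrio_bounds (h.lookup "severity")
      omega

-- the fold's result is exactly the priority of the worst severity present
theorem pv_worst_eq (l : List (List (String × String))) :
    l.foldl (fun w arr => max w (pvPrio (arr.lookup "severity"))) 0
      = (if (l.map (fun arr => arr.lookup "severity")).contains (some "high") then 2
         else if (l.map (fun arr => arr.lookup "severity")).contains (some "medium") then 1
         else 0) := by
  induction l with
  | nil => simp
  | cons h t ih =>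
      simp only [List.foldl_cons, List.map_cons, List.contains_cons]
      rw [pv_foldl_max_shift _ _ (by have := pvPrio_bounds (h.lookup "severity"); omega), ih]
      have hb := pv_worst_bounds t
      by_cases hH : h.lookup "severity" = some "high"
      · simp only [hH, pvPrio]
        simp
        omega
      · by_cases hM : h.lookup "severity" = some "medium"
        · simp only [hM, pvPrio]
          simp
          split_ifs <;> omega
        · have hp : pvPrio (h.lookup "severity") = 0 := by
            simp [pvPrio, hH, hM]
          have h1 : ((some "high" == h.lookup "severity") : Bool) = false := by
            simp only [beq_eq_false_iff_ne, ne_eq]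
            exact fun e => hH e.symm
          have h2 : ((some "medium" == h.lookup "severity") : Bool) = false := by
            simp only [beq_eq_false_iff_ne, ne_eq]
            exact fun e => hM e.symm
          rw [hp]
          simp only [h1, h2, Bool.false_or]
          split_ifs <;> omega

-- ===== VERDICT (by name: the statement is the Claim_ definition above) =====
theorem get_overall_assessment_spec : Claim_equal_get_overall_assessment := by
  intro l _ _
  unfold Spec_get_overall_assessment get_overall_assessment get_overall_assessment_alt
  by_cases hnil : l = []
  · simp [hnil]
  · simp only [hnil, if_false]
    rw [pv_worst_eq]
    split_ifs <;> simp_all
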